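-- pv_equiv track=rewrite | github.com/sai-somisetty/studybuddy | backend/agent_routes.py | extract_chapter
-- ===== SOURCE A (Python) =====
-- def extract_chapter(namespace: str) -> str:
--     """Extract chapter number from namespace like 'cma_f_law_ch1_s1' → '1'."""
--     if not namespace:
--         return ""
--     parts = namespace.split("_")
--     for part in parts:
--         if part.startswith("ch"):
--             return part.replace("ch", "")
--     return ""
-- ===== SOURCE B (Python) =====
-- def extract_chapter(namespace: str) -> str:
--     """Extract chapter number from namespace like 'cma_f_law_ch1_s1' -> '1'.
--
--     Single direct scan over the raw string: walk to the next separator to delimit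
--     the current token; no list of parts is ever materialized.
--     """
--     s = namespace
--     while s:
--         k = 0
--         while k < len(s) and s[k] != "_":
--             k += 1
--         tok = s[:k]
--         if tok.startswith("ch"):
--             return tok.replace("ch", "")
--         s = s[k + 1:]
--     return ""
-- ===== Notes on version B (the rewrite author's own statement) =====
-- stated objective: alternative
-- what changed: Replaces split('_')-then-loop-over-parts with a single direct scan over the raw string that delimits each token at the next underscore, so no list of parts is ever materialized.
import Mathlib
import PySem

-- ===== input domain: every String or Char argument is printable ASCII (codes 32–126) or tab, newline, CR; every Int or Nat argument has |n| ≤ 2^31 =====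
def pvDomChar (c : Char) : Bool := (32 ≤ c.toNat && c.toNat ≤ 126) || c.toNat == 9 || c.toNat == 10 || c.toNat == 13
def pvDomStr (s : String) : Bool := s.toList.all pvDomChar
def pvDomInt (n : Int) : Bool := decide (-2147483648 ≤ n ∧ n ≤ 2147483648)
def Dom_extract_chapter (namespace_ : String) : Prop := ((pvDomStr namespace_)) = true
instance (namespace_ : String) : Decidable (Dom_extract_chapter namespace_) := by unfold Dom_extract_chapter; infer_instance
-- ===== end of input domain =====

-- B replaces A's split("_")-then-loop-over-parts with one direct scan of the raw
-- string, one token at a time (alternative, same cost).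

-- ===== PORT A =====
-- the 'for part in parts' loop: first part starting with "ch" (all "ch" removed), else ""
def ecFindA : List String → String
  | [] => ""
  | p :: ps =>
    if PySem.Str.startswith p "ch" then PySem.Str.replace p "ch" "" else ecFindA ps

def extract_chapter (namespace_ : String) : String :=
  if namespace_.toList.isEmpty then ""                        -- if not namespace
  else ecFindA ((PySem.Str.split? namespace_ "_").getD [])    -- nonempty separator: split? is always some

-- ===== PORT B =====
-- the outer 'while s' loop of Source B on s.toList: the inner counting loop + s[:k] is
-- takeWhile up to the separator (k = tok.length); s[k+1:] is drop (k+1) (exact on lists)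
def ecScan (l : List Char) : List Char :=
  match l with
  | [] => []                                                   -- while loop exited: return ""
  | c :: t =>
    let tok := (c :: t).takeWhile (fun ch => ch != '_')        -- tok = s[:k]
    if PySem.Chars.startswith tok ['c', 'h'] then
      PySem.Chars.replace tok ['c', 'h'] []                    -- tok.replace("ch", "")
    else
      ecScan ((c :: t).drop (tok.length + 1))                  -- s = s[k+1:]
termination_by l.length
decreasing_by
  simp only [List.length_drop, List.length_cons]
  omega

def extract_chapter_alt (namespace_ : String) : String :=
  String.ofList (ecScan namespace_.toList)

-- ===== PRECONDITION & SPEC =====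
def Spec_extract_chapter (namespace_ : String) (out : String) : Prop := out = extract_chapter_alt namespace_
instance (namespace_ : String) (out : String) : Decidable (Spec_extract_chapter namespace_ out) := by unfold Spec_extract_chapter; infer_instance

-- ===== CLAIM (what is proved, stated in full; the proofs are below) =====
def Claim_equal_extract_chapter : Prop := ∀ (namespace_ : String), Dom_extract_chapter namespace_ → Spec_extract_chapter namespace_ (extract_chapter namespace_)

-- ===== LEMMAS AND PROOFS =====

-- the token decomposition A's split("_") produces, phrased the way B walks the string
def ecTokens (l : List Char) : List (List Char) :=
  let tok := l.takeWhile (fun ch => ch != '_')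
  tok :: (if l.length ≤ tok.length then [] else ecTokens (l.drop (tok.length + 1)))
termination_by l.length
decreasing_by
  simp only [List.length_drop]
  omega

-- char-level version of A's loop over the parts
def ecFindC : List (List Char) → List Char
  | [] => []
  | p :: ps =>
    if PySem.Chars.startswith p ['c', 'h'] then PySem.Chars.replace p ['c', 'h'] [] else ecFindC ps

theorem ec_go_spec (l : List Char) :
    ∀ (fuel : Nat) (cur : List Char) (acc : List (List Char)), l.length ≤ fuel →
      PySem.Chars.splitOn.go ['_'] fuel l cur acc =
        acc.reverse ++ (cur.reverse ++ l.takeWhile (fun ch => ch != '_')) ::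
          (if l.length ≤ (l.takeWhile (fun ch => ch != '_')).length then []
           else ecTokens (l.drop ((l.takeWhile (fun ch => ch != '_')).length + 1))) := by
  induction l with
  | nil =>
    intro fuel cur acc _
    cases fuel <;> simp [PySem.Chars.splitOn.go]
  | cons c t ih =>
    intro fuel cur acc hfuel
    cases fuel with
    | zero => simp at hfuel
    | succ f =>
      by_cases hc : c = '_'
      · have hpre : List.isPrefixOf ['_'] (c :: t) = true := by
          simp [List.isPrefixOf, hc]
        rw [PySem.Chars.splitOn.go]
        simp only [hpre, if_true]
        have hdrop : List.drop (['_'].length) (c :: t) = t := rfl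
        rw [hdrop, ih f [] (cur.reverse :: acc) (by simpa using Nat.le_of_succ_le_succ hfuel)]
        have hcond : ¬ (c :: t).length ≤ ((c :: t).takeWhile (fun ch => ch != '_')).length := by
          simp [hc]
        rw [if_neg hcond]
        conv_rhs => rw [ecTokens]
        simp [hc]
      · have hpre : List.isPrefixOf ['_'] (c :: t) = false := by
          simp [List.isPrefixOf]
          exact fun h => absurd h.symm hc
        rw [PySem.Chars.splitOn.go]
        simp only [hpre, Bool.false_eq_true, if_false]
        rw [ih f (c :: cur) acc (by simpa using Nat.le_of_succ_le_succ hfuel)]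
        have htok : (c :: t).takeWhile (fun ch => ch != '_') =
            c :: t.takeWhile (fun ch => ch != '_') := by
          simp [hc]
        rw [htok]
        simp only [List.length_cons, List.reverse_cons, List.drop_succ_cons,
          Nat.add_le_add_iff_right, List.append_assoc, List.cons_append, List.nil_append]

theorem ec_splitOn_eq_tokens (l : List Char) :
    PySem.Chars.splitOn l ['_'] = ecTokens l := by
  rw [PySem.Chars.splitOn, ec_go_spec l (l.length + 1) [] [] (Nat.le_succ _)]
  conv_rhs => rw [ecTokens]
  simp

theorem ec_findC_tokens : ∀ (n : Nat) (l : List Char), l.length ≤ n →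
    ecFindC (ecTokens l) = ecScan l := by
  intro n
  induction n with
  | zero =>
    intro l hl
    have hnil : l = [] := by cases l <;> simp_all
    subst hnil
    conv_lhs => rw [ecTokens]
    simp [ecFindC, ecScan, PySem.Chars.startswith]
  | succ n ih =>
    intro l hl
    cases l with
    | nil =>
      conv_lhs => rw [ecTokens]
      simp [ecFindC, ecScan, PySem.Chars.startswith]
    | cons c t =>
      conv_lhs => rw [ecTokens]
      by_cases hsw : PySem.Chars.startswith ((c :: t).takeWhile (fun ch => ch != '_')) ['c', 'h'] = true
      · simp [ecFindC, ecScan, hsw]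
      · have hb : PySem.Chars.startswith ((c :: t).takeWhile (fun ch => ch != '_')) ['c', 'h'] = false := by
          simpa using hsw
        have hl' : t.length ≤ n := by
          simp only [List.length_cons] at hl
          omega
        simp [ecFindC, ecScan, hb]
        by_cases hK : t.length < (List.takeWhile (fun ch => ch != '_') (c :: t)).length
        · rw [if_pos hK]
          have hdk : List.drop (List.takeWhile (fun ch => ch != '_') (c :: t)).length t = [] :=
            List.drop_eq_nil_of_le (by omega)
          rw [hdk]
          simp [ecFindC, ecScan]
        · rw [if_neg hK]
          exact ih _ (by simp only [List.length_drop]; omega)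

theorem ec_findA_map (L : List (List Char)) :
    ecFindA (L.map String.ofList) = String.ofList (ecFindC L) := by
  induction L with
  | nil => simp [ecFindA, ecFindC]
  | cons p ps ih =>
    have hch : ("ch" : String).toList = ['c', 'h'] := by decide
    rw [List.map_cons, ecFindA, ecFindC]
    by_cases hsw : PySem.Chars.startswith p ['c', 'h']
    · simp [PySem.Str.startswith, hch, hsw, PySem.Str.replace]
    · simp [PySem.Str.startswith, hch, hsw, ih]

-- ===== VERDICT (by name: the statement is the Claim_ definition above) =====
theorem extract_chapter_spec : Claim_equal_extract_chapter := by
  intro ns _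
  unfold Spec_extract_chapter extract_chapter extract_chapter_alt
  by_cases hns : ns.toList = []
  · simp [hns, ecScan]
  · have hsplit : (PySem.Str.split? ns "_").getD [] =
        (PySem.Chars.splitOn ns.toList ['_']).map String.ofList := by
      have h_ : ("_" : String).toList = ['_'] := by decide
      simp [PySem.Str.split?, PySem.Chars.split?, h_]
    rw [if_neg (by simp [List.isEmpty_iff, hns]), hsplit]
    rw [ec_findA_map, ec_splitOn_eq_tokens, ec_findC_tokens ns.toList.length ns.toList (Nat.le_refl _)]
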